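-- pv_equiv track=rewrite | github.com/franyatta/Francryption | app.py | lsfr_encrypt
-- ===== SOURCE A (Python) =====
-- def lsfr_encrypt(password):
--     char_set = "ABCDEFGHIJKLMNOPQRSTUVWXYZabcdefghijklmnopqrstuvwxyz0123456789"
--     # Convert the password to a list of integers
--     key = [char_set.index(char) for char in password if char in char_set]
--
--     # Initialize the LFSR with the key
--     register = key.copy()
--
--     # Define the tap positions (e.g., [0, 2, 3, 5])
--     taps = [0, 2,]
--
--     # Define the length of the LFSR
--     length = len(register)
--
--     # Initialize the encrypted password as an empty string
--     encrypted_password = ""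
--
--     # Iterate over each character in the password
--     for char in password:
--         if char in char_set:
--             # Calculate the XOR of the tapped positions
--             xor_result = 0
--             for tap in taps:
--                 xor_result ^= register[tap]
--
--             # Convert the XOR result to a character within the custom character set
--             encrypted_char = char_set[xor_result % len(char_set)]
--             encrypted_password += encrypted_char
--
--             # Shift the register to the right
--             feedback = register[length - 1]
--             register = [feedback] + register[:-1]
--         else:
--             encrypted_password += char
--
--     return encrypted_password
-- ===== SOURCE B (Python) =====
-- def lsfr_encrypt(password):
--     char_set = "ABCDEFGHIJKLMNOPQRSTUVWXYZabcdefghijklmnopqrstuvwxyz0123456789"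
--     key = [char_set.index(c) for c in password if c in char_set]
--     n = len(key)
--     out = []
--     k = 0
--     for c in password:
--         if c in char_set:
--             # register after k right-rotations has key[(j - k) % n] at position j
--             x = key[-k % n] ^ key[(2 - k) % n]
--             out.append(char_set[x % 62])
--             k += 1
--         else:
--             out.append(c)
--     return ''.join(out)
-- ===== Notes on version B (the rewrite author's own statement) =====
-- stated objective: faster
-- what changed: B never materialises or rebuilds the shifting register: it computes each step's two tapped register cells directly from the fixed key via modular index arithmetic (position j after k right-rotations is key[(j-k) % n]), turning A's per-character O(n) list rebuild into O(1) work per character.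
import Mathlib
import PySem

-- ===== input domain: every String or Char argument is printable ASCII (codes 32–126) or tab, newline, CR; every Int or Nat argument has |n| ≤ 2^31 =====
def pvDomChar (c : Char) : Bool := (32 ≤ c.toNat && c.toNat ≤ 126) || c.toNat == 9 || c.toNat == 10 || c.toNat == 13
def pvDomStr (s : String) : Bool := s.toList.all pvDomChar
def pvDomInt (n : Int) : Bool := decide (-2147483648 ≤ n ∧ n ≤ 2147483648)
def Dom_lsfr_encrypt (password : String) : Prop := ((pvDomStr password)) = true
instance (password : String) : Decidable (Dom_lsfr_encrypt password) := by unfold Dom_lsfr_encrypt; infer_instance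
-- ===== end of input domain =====

-- B replaces A's per-character register rebuild by O(1) modular index arithmetic into the
-- fixed key (position j after k right-rotations is key[(j-k) mod n]); asymptotically faster.

-- ===== PORT A =====
def pvCharSet : List Char :=
  "ABCDEFGHIJKLMNOPQRSTUVWXYZabcdefghijklmnopqrstuvwxyz0123456789".toList

-- key = [char_set.index(char) for char in password if char in char_set]  (shared first line of both sources)
def pvKey (cs : List Char) : List Int :=
  (cs.filter (fun c => pvCharSet.contains c)).map
    (fun c => (((PySem.List.index? pvCharSet c).getD 0 : Nat) : Int))

-- loop body of A: state = (encrypted chars so far, register); `length` is captured before the loop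
def pvStepA (length : Int) (st : List Char × List Int) (c : Char) : List Char × List Int :=
  if pvCharSet.contains c then
    let xor_result := [(0 : Int), 2].foldl
      (fun x t => PySem.Int.bxor x (PySem.List.pyGetD st.2 t 0)) 0
    let ec := PySem.List.pyGetD pvCharSet (PySem.Int.mod xor_result (pvCharSet.length : Int)) 'A'
    let feedback := PySem.List.pyGetD st.2 (length - 1) 0
    (st.1 ++ [ec], feedback :: PySem.List.slice st.2 none (some (-1)))
  else
    (st.1 ++ [c], st.2)

def lsfr_encrypt (password : String) : String :=
  let key := pvKey password.toList
  let register := key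
  let length : Int := register.length
  String.ofList (password.toList.foldl (pvStepA length) ([], register)).1

-- ===== PORT B =====
-- loop body of B: state = (output chars so far, count k of in-alphabet chars processed)
def pvStepB (key : List Int) (n : Int) (st : List Char × Int) (c : Char) : List Char × Int :=
  if pvCharSet.contains c then
    let x := PySem.Int.bxor (PySem.List.pyGetD key (PySem.Int.mod (-st.2) n) 0)
                            (PySem.List.pyGetD key (PySem.Int.mod (2 - st.2) n) 0)
    (st.1 ++ [PySem.List.pyGetD pvCharSet (PySem.Int.mod x 62) 'A'], st.2 + 1)
  else
    (st.1 ++ [c], st.2)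

def lsfr_encrypt_alt (password : String) : String :=
  let key := pvKey password.toList
  let n : Int := key.length
  String.ofList (password.toList.foldl (pvStepB key n) ([], 0)).1

-- ===== PRECONDITION & SPEC =====
-- Pre_ excludes exactly the passwords with 1 or 2 alphabet characters, on which A raises
-- IndexError (register[2] on a register shorter than 3 / register[0] on length 1).
def Pre_lsfr_encrypt (password : String) : Prop :=
  (password.toList.filter (fun c => pvCharSet.contains c)).length = 0 ∨
  3 ≤ (password.toList.filter (fun c => pvCharSet.contains c)).length
instance (password : String) : Decidable (Pre_lsfr_encrypt password) := by
  unfold Pre_lsfr_encrypt; infer_instance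

def pvWitness_lsfr_encrypt : String := "Hello World!"

def Spec_lsfr_encrypt (password : String) (out : String) : Prop := out = lsfr_encrypt_alt password
instance (password : String) (out : String) : Decidable (Spec_lsfr_encrypt password out) := by
  unfold Spec_lsfr_encrypt; infer_instance

-- ===== CLAIM (what is proved, stated in full; the proofs are below) =====
def Claim_equal_lsfr_encrypt : Prop := ∀ (password : String), Dom_lsfr_encrypt password → Pre_lsfr_encrypt password → Spec_lsfr_encrypt password (lsfr_encrypt password)

-- ===== LEMMAS AND PROOFS =====

-- one right-rotation: [last] + register[:-1]
lemma pv_rot_step {α : Type} (l : List α) (h : l ≠ []) :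
    l.getLast h :: l.dropLast = l.rotate (l.length - 1) := by
  have hl : 0 < l.length := List.length_pos_iff.mpr h
  apply List.ext_getElem
  · simp; omega
  · intro i h1 h2
    rw [List.getElem_rotate]
    cases i with
    | zero =>
      simp only [List.getElem_cons_zero, List.getLast_eq_getElem]
      congr 1
      rw [Nat.zero_add, Nat.mod_eq_of_lt (by omega)]
    | succ j =>
      have hj : j < l.length - 1 := by simpa using h1
      rw [List.getElem_cons_succ, List.getElem_dropLast]
      congr 1
      have he : j + 1 + (l.length - 1) = j + l.length := by omega
      rw [he, Nat.add_mod_right]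
      exact (Nat.mod_eq_of_lt (by omega)).symm

-- the tapped cell: position j of the register after k right-rotations is key[(j-k) mod n]
lemma pv_rot_get (key : List Int) (k j : Nat) (hj : j < key.length) :
    PySem.List.pyGetD (key.rotate ((key.length - 1) * k)) (j : Int) 0
      = PySem.List.pyGetD key (PySem.Int.mod ((j : Int) - (k : Int)) (key.length : Int)) 0 := by
  have hn : 0 < key.length := by omega
  have hnz : (0:Int) < (key.length : Int) := by exact_mod_cast hn
  rw [PySem.Int.mod_eq_emod_of_pos hnz]
  rw [PySem.List.pyGetD_eq_getElem _ _ (by positivity)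
        (by rw [List.length_rotate]; exact_mod_cast hj)]
  rw [PySem.List.pyGetD_eq_getElem _ _ (Int.emod_nonneg _ (by omega))
        (Int.emod_lt_of_pos _ hnz)]
  rw [List.getElem_rotate]
  congr 1
  have h1 : (((j + (key.length - 1) * k) % key.length : Nat) : Int)
      = ((j:Int) - (k:Int)) % (key.length:Int) := by
    push_cast [Nat.cast_sub hn]
    have he : (j:Int) + ((key.length:Int) - 1) * k = ((j:Int) - k) + (key.length:Int) * k := by
      ring
    rw [he, Int.add_mul_emod_self_left]
  have h2 : ((j:Int).toNat + (key.length - 1) * k) % key.length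
      = (j + (key.length - 1) * k) % key.length := by
    simp
  rw [h2, ← h1, Int.toNat_natCast]

-- the two folds agree, given that every in-alphabet char forces 3 <= n
lemma pv_loop_eq (key : List Int) : ∀ (cs : List Char),
    (∀ c ∈ cs, pvCharSet.contains c = true → 3 ≤ key.length) →
    ∀ (k : Nat) (acc : List Char),
      (cs.foldl (pvStepA (key.length : Int)) (acc, key.rotate ((key.length - 1) * k))).1
        = (cs.foldl (pvStepB key (key.length : Int)) (acc, (k : Int))).1 := by
  intro cs
  induction cs with
  | nil => intro _ k acc; rfl
  | cons c cs ih =>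
    intro hcs k acc
    simp only [List.foldl_cons]
    by_cases hc : pvCharSet.contains c = true
    · have h3 : 3 ≤ key.length := hcs c (List.mem_cons_self) hc
      have hlen : (key.rotate ((key.length - 1) * k)).length = key.length :=
        List.length_rotate key _
      have hne : key.rotate ((key.length - 1) * k) ≠ [] := by
        intro h; rw [h] at hlen; simp at hlen; omega
      have g0 := pv_rot_get key k 0 (by omega)
      have g2 := pv_rot_get key k 2 (by omega)
      simp only [Nat.cast_zero, Nat.cast_ofNat, zero_sub] at g0 g2
      have bz : ∀ x : Int, PySem.Int.bxor 0 x = x := fun x => by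
        rw [PySem.Int.bxor_comm, PySem.Int.bxor_zero]
      have h62 : (pvCharSet.length : Int) = 62 := by decide
      have hfb : PySem.List.pyGetD (key.rotate ((key.length - 1) * k))
          ((key.length : Int) - 1) 0
          = (key.rotate ((key.length - 1) * k)).getLast hne := by
        rw [PySem.List.pyGetD_eq_getElem _ _ (by omega)
              (by rw [hlen]; omega),
            List.getLast_eq_getElem]
        congr 1
        rw [hlen]
        omega
      simp only [pvStepA, pvStepB, hc, if_pos, List.foldl_cons, List.foldl_nil]
      rw [bz, g0, g2, h62, hfb, PySem.List.slice_to_neg_one,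
          pv_rot_step _ hne, hlen, List.rotate_rotate, ← Nat.mul_succ]
      have hk1 : (k : Int) + 1 = ((k + 1 : Nat) : Int) := by push_cast; ring
      rw [hk1]
      exact ih (fun c' hm hc' => hcs c' (List.mem_cons_of_mem c hm) hc') (k + 1) _
    · simp only [pvStepA, pvStepB, hc, Bool.false_eq_true, if_false]
      exact ih (fun c' hm hc' => hcs c' (List.mem_cons_of_mem c hm) hc') k _

-- ===== VERDICT (by name: the statement is the Claim_ definition above) =====
theorem lsfr_encrypt_spec : Claim_equal_lsfr_encrypt := by
  unfold Claim_equal_lsfr_encrypt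
  intro password _ hpre
  unfold Spec_lsfr_encrypt lsfr_encrypt lsfr_encrypt_alt
  have hkl : (pvKey password.toList).length
      = (password.toList.filter (fun c => pvCharSet.contains c)).length := by
    simp [pvKey]
  have hcs : ∀ c ∈ password.toList, pvCharSet.contains c = true →
      3 ≤ (pvKey password.toList).length := by
    intro c hm hc
    rcases hpre with h0 | h3
    · exfalso
      have hmem : c ∈ password.toList.filter (fun c => pvCharSet.contains c) :=
        List.mem_filter.mpr ⟨hm, hc⟩
      rw [List.length_eq_zero_iff] at h0
      rw [h0] at hmem
      exact List.not_mem_nil hmem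
    · omega
  have h := pv_loop_eq (pvKey password.toList) password.toList hcs 0 []
  simp only [Nat.mul_zero, List.rotate_zero, Nat.cast_zero] at h
  exact congrArg String.ofList h
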